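-- pv_equiv track=rewrite | github.com/ghengis5-git/librarian | librarian/sitegen.py | _group_by_tag
-- ===== SOURCE A (Python) =====
-- from collections import defaultdict
--
-- def _group_by_tag(documents: list[dict]) -> dict:
--     """Group documents by tag for the sidebar tree."""
--     groups: dict[str, list[dict]] = defaultdict(list)
--     for doc in documents:
--         tags = doc.get("tags") or []
--         if not tags:
--             groups["untagged"].append(doc)
--         else:
--             for tag in tags:
--                 groups[tag].append(doc)
--     return dict(sorted(groups.items()))
-- ===== SOURCE B (Python) =====
-- def _group_by_tag(documents: list[dict]) -> dict:
--     """Group documents by tag for the sidebar tree."""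
--     pairs = [(tag, doc) for doc in documents for tag in (doc.get("tags") or ["untagged"])]
--     pairs.sort(key=lambda p: p[0])
--     result: dict[str, list[dict]] = {}
--     rest = pairs
--     while rest:
--         tag = rest[0][0]
--         n = 1
--         while n < len(rest) and rest[n][0] == tag:
--             n += 1
--         result[tag] = [doc for _, doc in rest[:n]]
--         rest = rest[n:]
--     return result
-- ===== Notes on version B (the rewrite author's own statement) =====
-- stated objective: alternative
-- what changed: Replaces the defaultdict hash-accumulate-then-sort-keys of A by a flat (tag, doc) pair list that is stably sorted by tag once and then grouped by scanning consecutive equal-tag runs.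
import Mathlib
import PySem

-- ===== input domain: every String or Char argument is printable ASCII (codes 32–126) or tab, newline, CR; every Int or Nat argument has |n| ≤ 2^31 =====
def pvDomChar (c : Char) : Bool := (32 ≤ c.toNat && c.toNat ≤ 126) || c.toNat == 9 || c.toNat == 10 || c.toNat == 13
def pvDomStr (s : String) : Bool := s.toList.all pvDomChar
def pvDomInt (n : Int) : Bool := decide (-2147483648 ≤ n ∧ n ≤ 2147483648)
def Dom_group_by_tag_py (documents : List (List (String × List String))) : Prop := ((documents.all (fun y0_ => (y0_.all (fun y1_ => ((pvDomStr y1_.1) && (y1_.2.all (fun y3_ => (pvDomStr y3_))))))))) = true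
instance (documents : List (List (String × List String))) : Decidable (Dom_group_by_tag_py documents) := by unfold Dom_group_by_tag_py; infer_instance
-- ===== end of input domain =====

-- B replaces A's defaultdict hash-accumulate-then-sort-keys by building a flat (tag, doc) pair
-- list, stably sorting it by tag once, and grouping consecutive equal-tag runs (objective: alternative).


-- ===== PORT A =====
-- A: groups = defaultdict(list); for each doc append it under each of its tags ("untagged" when
-- doc.get("tags") is missing/empty); return dict(sorted(groups.items())).  Python's sorted compares
-- the (key, value) tuples, but the dict's keys are distinct so only the string keys are ever
-- compared: ported as a stable sort keyed on the first component.
def group_by_tag_py (documents : List (List (String × List String))) : List (String × List (List (String × List String))) :=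
  let groups : PySem.Dict String (List (List (String × List String))) :=
    documents.foldl (fun g doc =>
      let tags := ((PySem.Dict.mk doc).get? "tags").getD []
      if tags = [] then g.modify "untagged" [] (fun v => v ++ [doc])
      else tags.foldl (fun g tag => g.modify tag [] (fun v => v ++ [doc])) g) PySem.Dict.empty
  PySem.List.sorted groups.items (fun p => p.1)

-- ===== PORT B =====
-- rest[:n] / rest[n:] with n = length of the leading run of equal tags: takeWhile / dropWhile.
def pvGroupRuns : List (String × List (String × List String)) → List (String × List (List (String × List String)))
  | [] => []
  | (t, d) :: rest =>
      (t, d :: (rest.takeWhile (fun p => p.1 == t)).map (fun p => p.2))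
        :: pvGroupRuns (rest.dropWhile (fun p => p.1 == t))
termination_by l => l.length
decreasing_by
  exact Nat.lt_succ_of_le (List.length_dropWhile_le _ _)

def group_by_tag_py_alt (documents : List (List (String × List String))) : List (String × List (List (String × List String))) :=
  let pairs := documents.flatMap (fun doc =>
    let ts := ((PySem.Dict.mk doc).get? "tags").getD []
    (if ts = [] then ["untagged"] else ts).map (fun t => (t, doc)))
  pvGroupRuns (PySem.List.sorted pairs (fun p => p.1))

-- ===== PRECONDITION & SPEC =====
def Spec_group_by_tag_py (documents : List (List (String × List String))) (out : List (String × List (List (String × List String)))) : Prop := out = group_by_tag_py_alt documents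
instance (documents : List (List (String × List String))) (out : List (String × List (List (String × List String)))) : Decidable (Spec_group_by_tag_py documents out) := by unfold Spec_group_by_tag_py; infer_instance

-- ===== CLAIM (what is proved, stated in full; the proofs are below) =====
def Claim_equal_group_by_tag_py : Prop := ∀ (documents : List (List (String × List String))), Dom_group_by_tag_py documents → Spec_group_by_tag_py documents (group_by_tag_py documents)

-- ===== LEMMAS AND PROOFS =====

-- The flat (tag, doc) pair list both sides are (shown to be) built from.
def pvPairs (documents : List (List (String × List String))) : List (String × List (String × List String)) :=
  documents.flatMap (fun doc =>
    let ts := ((PySem.Dict.mk doc).get? "tags").getD []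
    (if ts = [] then ["untagged"] else ts).map (fun t => (t, doc)))

-- A's accumulation loop is the single pair-by-pair modify loop over pvPairs.
theorem pvA_fold_eq (documents : List (List (String × List String)))
    (g : PySem.Dict String (List (List (String × List String)))) :
    documents.foldl (fun g doc =>
      let tags := ((PySem.Dict.mk doc).get? "tags").getD []
      if tags = [] then g.modify "untagged" [] (fun v => v ++ [doc])
      else tags.foldl (fun g tag => g.modify tag [] (fun v => v ++ [doc])) g) g
    = (pvPairs documents).foldl (fun g p => g.modify p.1 [] (fun v => v ++ [p.2])) g := by
  induction documents generalizing g with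
  | nil => rfl
  | cons doc rest ih =>
    simp only [pvPairs, List.flatMap_cons, List.foldl_append, List.foldl_cons] at *
    rw [ih]
    congr 1
    by_cases h : ((PySem.Dict.mk doc).get? "tags").getD [] = []
    · simp [h]
    · simp [h, List.foldl_map]

-- Stability of PySem's sort: filtering on one key value commutes with sorting.
theorem pvFilter_insertBy {α κ : Type} [LinearOrder κ] (key : α → κ) (k : κ)
    (x : α) (ys : List α) (hs : ys.Pairwise (fun a b => key a ≤ key b)) :
    (PySem.List.insertBy (fun a b => decide (key a < key b)) x ys).filter (fun a => decide (key a = k))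
    = ys.filter (fun a => decide (key a = k)) ++ (if key x = k then [x] else []) := by
  induction ys with
  | nil =>
    simp only [PySem.List.insertBy, List.filter, List.nil_append]
    by_cases h : key x = k <;> simp [h]
  | cons y ys ih =>
    rw [PySem.List.insertBy.eq_2]
    rcases List.pairwise_cons.mp hs with ⟨hy, hys⟩
    by_cases hlt : key x < key y
    · simp only [hlt, decide_true, if_true]
      by_cases hk : key x = k
      · have hnil : (y :: ys).filter (fun a => decide (key a = k)) = [] := by
          apply List.filter_eq_nil_iff.mpr
          intro z hz
          have hyz : key y ≤ key z := by
            rcases List.mem_cons.mp hz with rfl | hz'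
            · exact le_refl _
            · exact hy z hz'
          have hkz : k < key z := lt_of_lt_of_le (hk ▸ hlt) hyz
          simp only [decide_eq_true_eq]
          exact fun h => absurd (h ▸ hkz) (lt_irrefl _)
        rw [List.filter_cons_of_pos (by simp [hk]), hnil]
        simp [hk]
      · rw [List.filter_cons_of_neg (by simp [hk])]
        simp [hk]
    · simp only [hlt, decide_false, Bool.false_eq_true, if_false]
      rw [List.filter_cons, List.filter_cons, ih hys]
      by_cases hk : key y = k <;> simp [hk]
theorem pvFilter_sorted {α κ : Type} [LinearOrder κ] (xs : List α) (key : α → κ) (k : κ) :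
    (PySem.List.sorted xs key).filter (fun a => decide (key a = k))
    = xs.filter (fun a => decide (key a = k)) := by
  rw [PySem.List.sorted_eq_foldl_insertBy]
  suffices h : ∀ acc : List α, acc.Pairwise (fun a b => key a ≤ key b) →
      (xs.foldl (fun acc x => PySem.List.insertBy (fun a b => decide (key a < key b)) x acc) acc).filter
        (fun a => decide (key a = k))
      = acc.filter (fun a => decide (key a = k)) ++ xs.filter (fun a => decide (key a = k)) by
    simpa using h [] (by simp)
  induction xs with
  | nil => simp
  | cons x xs ih =>
    intro acc hacc
    rw [List.foldl_cons, ih _ (PySem.List.insertBy_pairwise_le key x acc hacc),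
      pvFilter_insertBy key k x acc hacc, List.filter_cons]
    by_cases hk : key x = k <;> simp [hk]

-- Set.ofList of a list starting with a run of t's, with no t afterwards.
theorem pvOfList_run (t : String) (m r : List String)
    (hm : ∀ x ∈ m, x = t) (hr : t ∉ r) :
    PySem.Set.ofList (t :: (m ++ r)) = t :: PySem.Set.ofList r := by
  induction m with
  | nil =>
    rw [List.nil_append, PySem.Set.ofList_cons]
    congr 1
    simp only [PySem.Set.discard]
    apply List.filter_eq_self.mpr
    intro a ha
    have : a ∈ r := (PySem.Set.mem_ofList r a).mp ha
    simp; rintro rfl; exact hr this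
  | cons y m ihm =>
    have hyt : y = t := hm y (by simp)
    subst hyt
    have ih' := ihm (fun x hx => hm x (by simp [hx]))
    rw [PySem.Set.ofList_cons] at ih'
    have h2 := (List.cons.inj ih').2
    rw [List.cons_append, PySem.Set.ofList_cons, PySem.Set.ofList_cons, ← h2]
    congr 1
    simp [PySem.Set.discard, List.filter_filter]

-- Grouping consecutive runs of a ≤-sorted pair list = one entry per first occurrence of a tag,
-- holding the filtered documents.
theorem pvGroupRuns_eq (L : List (String × List (String × List String)))
    (hL : L.Pairwise (fun a b => a.1 ≤ b.1)) :
    pvGroupRuns L = (PySem.Set.ofList (L.map (fun p => p.1))).map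
      (fun k => (k, (L.filter (fun p => decide (p.1 = k))).map (fun p => p.2))) := by
  induction L using pvGroupRuns.induct with
  | case1 => simp [pvGroupRuns]
  | case2 t d rest ih =>
    rcases List.pairwise_cons.mp hL with ⟨hd, hrest⟩
    set s := rest.takeWhile (fun p => p.1 == t) with hs
    set r := rest.dropWhile (fun p => p.1 == t) with hrr
    have hsplit : rest = s ++ r := (List.takeWhile_append_dropWhile).symm
    have hsall : ∀ p ∈ s, p.1 = t := by
      intro p hp
      have := List.mem_takeWhile_imp (hs ▸ hp)
      simpa using this
    have hrnot : ∀ p ∈ r, p.1 ≠ t := by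
      intro p hp heq
      -- head of r fails the predicate; later elements are ≥ head
      rcases hr : r with _ | ⟨q, rr⟩
      · simp [hr] at hp
      · have hq : ¬ (q.1 == t) = true := by
          have := List.head?_dropWhile_not (fun p => p.1 == t) rest
          rw [← hrr, hr] at this; simpa using this
        have hq' : q.1 ≠ t := by simpa using hq
        rcases List.mem_cons.mp (hr ▸ hp) with rfl | hp'
        · exact hq' heq
        · -- q ≤ p by sortedness within rest, and p.1 = t while q.1 ≠ t, q.1 ≥ all of s∪… 
          have hsub : (q :: rr).Sublist rest := hr ▸ hrr ▸ List.dropWhile_sublist _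
          have hpair : (q :: rr).Pairwise (fun a b => a.1 ≤ b.1) := hrest.sublist hsub
          have hqp : q.1 ≤ p.1 := (List.pairwise_cons.mp hpair).1 p hp'
          -- also t ≤ q.1 since q ∈ rest
          have hqrest : q ∈ rest := hsub.mem (by simp)
          have htq : t ≤ q.1 := hd q hqrest
          have : q.1 = t := le_antisymm (heq ▸ hqp) htq
          exact hq' this
    have hkeys : PySem.Set.ofList ((( (t, d) :: rest)).map (fun p => p.1))
        = t :: PySem.Set.ofList (r.map (fun p => p.1)) := by
      rw [List.map_cons, hsplit, List.map_append]
      exact pvOfList_run t _ _ (by intro x hx; rcases List.mem_map.mp hx with ⟨p, hp, rfl⟩; exact hsall p hp)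
        (by intro hx; rcases List.mem_map.mp hx with ⟨p, hp, hpt⟩; exact hrnot p hp hpt)
    have hrpair : r.Pairwise (fun a b => a.1 ≤ b.1) := hrest.sublist (hrr ▸ List.dropWhile_sublist _)
    rw [pvGroupRuns, ih hrpair, hkeys, List.map_cons]
    congr 1
    · -- group for t
      have hfs : s.filter (fun p => decide (p.1 = t)) = s :=
        List.filter_eq_self.mpr (fun p hp => by simp [hsall p hp])
      have hfr : r.filter (fun p => decide (p.1 = t)) = [] :=
        List.filter_eq_nil_iff.mpr (fun p hp => by simp [hrnot p hp])
      have hrestf : rest.filter (fun p => decide (p.1 = t)) = s := by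
        rw [hsplit, List.filter_append, hfs, hfr, List.append_nil]
      have hstake : rest.takeWhile (fun p => p.1 == t) = s := hs.symm
      simp [hrestf, hstake]
    · -- groups for the remaining keys: filtering (t,d)::s++r at k ≠ t is filtering r
      apply List.map_congr_left
      intro k hk
      have hkr : k ∈ r.map (fun p => p.1) := by
        have := (PySem.Set.mem_ofList _ k).mp hk; exact this
      have hkt : k ≠ t := by
        rcases List.mem_map.mp hkr with ⟨p, hp, rfl⟩
        exact hrnot p hp
      have hfsk : s.filter (fun p => decide (p.1 = k)) = [] :=
        List.filter_eq_nil_iff.mpr (fun p hp => by simp [hsall p hp, Ne.symm hkt])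
      have hrf : rest.filter (fun p => decide (p.1 = k)) = r.filter (fun p => decide (p.1 = k)) := by
        rw [hsplit, List.filter_append, hfsk, List.nil_append]
      simp [hrf, Ne.symm hkt]

-- ofList keeps a subsequence of its input (first occurrences, in order).
theorem pvOfList_sublist {α : Type} [BEq α] [LawfulBEq α] (xs : List α) :
    (PySem.Set.ofList xs).Sublist xs := by
  induction xs with
  | nil => simp
  | cons x xs ih =>
    rw [PySem.Set.ofList_cons]
    apply List.Sublist.cons₂
    have hdis : ((PySem.Set.ofList xs).discard x).Sublist (PySem.Set.ofList xs) := by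
      simp only [PySem.Set.discard]
      exact List.filter_sublist
    exact hdis.trans ih

-- ===== VERDICT (by name: the statement is the Claim_ definition above) =====
theorem group_by_tag_py_spec : Claim_equal_group_by_tag_py := by
  intro documents _
  unfold Spec_group_by_tag_py
  have hB : group_by_tag_py_alt documents
      = pvGroupRuns (PySem.List.sorted (pvPairs documents) (fun p => p.1)) := rfl
  have hA : group_by_tag_py documents
      = PySem.List.sorted ((pvPairs documents).foldl
          (fun g p => g.modify p.1 [] (fun v => v ++ [p.2])) PySem.Dict.empty).items
          (fun p => p.1) := by
    unfold group_by_tag_py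
    rw [pvA_fold_eq]
  rw [hA, hB]
  set P := pvPairs documents with hP
  set G := P.foldl (fun g p => g.modify p.1 [] (fun v => v ++ [p.2])) PySem.Dict.empty with hG
  set L := PySem.List.sorted P (fun p => p.1) with hL
  set K := PySem.Set.ofList (P.map (fun p => p.1)) with hK
  set sortedK := PySem.List.sorted K (fun x => x) with hsK
  have hnd : G.keys.Nodup :=
    PySem.Dict.nodup_keys_foldl_modify_key P (fun p => p.1) [] (fun _ p v => v ++ [p.2])
      PySem.Dict.empty (by simp)
  have hkeys : G.keys = K := by
    rw [hG]
    have := PySem.Dict.keys_foldl_modify_key P (fun p => p.1) [] (fun _ p v => v ++ [p.2])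
      PySem.Dict.empty
    simpa [PySem.Set.update_nil_left] using this
  have hgetD : ∀ k, G.getD k [] = (P.filter (fun p => decide (p.1 = k))).map (fun p => p.2) := by
    intro k
    have h := PySem.Dict.getD_foldl_modify_append P PySem.Dict.empty k
    have hpred : P.filter (fun p => p.1 == k) = P.filter (fun p => decide (p.1 = k)) :=
      List.filter_congr (fun p _ => Bool.beq_eq_decide_eq p.1 k)
    rw [hG]
    simpa [hpred] using h
  have hitems : G.items = K.map (fun k => (k, G.getD k [])) := by
    rw [← hkeys]; exact PySem.Dict.items_eq_map_keys G hnd []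
  -- A side: sorting the one-entry-per-key items list = mapping over the sorted distinct keys
  have hAside : PySem.List.sorted (K.map (fun k => (k, G.getD k []))) (fun p => p.1)
      = sortedK.map (fun k => (k, G.getD k [])) := by
    apply PySem.List.sorted_eq_of_perm_of_pairwise_lt
    · exact List.Perm.map _ (PySem.List.sorted_perm K (fun x => x) false)
    · simpa [List.pairwise_map] using PySem.List.sorted_ofList_pairwise_lt (P.map (fun p => p.1))
  -- B side: grouping the sorted pair list
  have hBside := pvGroupRuns_eq L (PySem.List.sorted_pairwise P (fun p => p.1))
  have hLkeys : PySem.Set.ofList (L.map (fun p => p.1)) = sortedK := by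
    symm
    apply PySem.List.sorted_eq_of_perm_of_pairwise_lt
    · apply (List.perm_ext_iff_of_nodup (PySem.Set.nodup_ofList _) (PySem.Set.nodup_ofList _)).mpr
      intro a
      rw [PySem.Set.mem_ofList, PySem.Set.mem_ofList]
      exact List.Perm.mem_iff (List.Perm.map _ (PySem.List.sorted_perm P (fun p => p.1) false))
    · have hle : (PySem.Set.ofList (L.map (fun p => p.1))).Pairwise (· ≤ ·) :=
        (PySem.List.sorted_map_key_pairwise P (fun p => p.1)).sublist (pvOfList_sublist _)
      have hne : (PySem.Set.ofList (L.map (fun p => p.1))).Pairwise (· ≠ ·) :=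
        PySem.Set.nodup_ofList _
      exact (hle.and hne).imp (fun h => lt_of_le_of_ne h.1 h.2)
  rw [hitems, hAside, hBside, hLkeys]
  apply List.map_congr_left
  intro k _
  rw [hgetD k, pvFilter_sorted P (fun p => p.1) k]
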